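-- pv_equiv track=rewrite | github.com/MorningMonkey/Convoy | scripts/validate_agent_markdown.py | find_frontmatter_block
-- ===== SOURCE A (Python) =====
-- from typing import Dict, List, Tuple
--
-- def find_frontmatter_block(lines: List[str]) -> Tuple[int, int]:
--     """
--     Returns (start_index, end_index) for YAML frontmatter block (inclusive bounds of delimiters),
--     or (-1, -1) if not found.
--     """
--     # Find first non-empty line
--     i = 0
--     while i < len(lines) and lines[i].strip() == "":
--         i += 1
--     if i >= len(lines) or lines[i].strip() != "---":
--         return (-1, -1)
--
--     start = i
--     # Find closing delimiter
--     j = start + 1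
--     while j < len(lines):
--         if lines[j].strip() == "---":
--             return (start, j)
--         j += 1
--     # Unclosed
--     return (start, -1)
-- ===== SOURCE B (Python) =====
-- from typing import List, Tuple
--
-- def find_frontmatter_block(lines: List[str]) -> Tuple[int, int]:
--     delims = [i for i, l in enumerate(lines) if l.strip() == "---"]
--     first = next((i for i, l in enumerate(lines) if l.strip() != ""), None)
--     if first is None or first not in delims:
--         return (-1, -1)
--     end = next((d for d in delims if d > first), -1)
--     return (first, end)
-- ===== Notes on version B (the rewrite author's own statement) =====
-- stated objective: alternative
-- what changed: Replaces A's guarded skip-then-scan while-loops with a build-tables-then-query decomposition: one pass collects all delimiter indices, one finds the first non-blank line, and the answer is read off the tables.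
import Mathlib
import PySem

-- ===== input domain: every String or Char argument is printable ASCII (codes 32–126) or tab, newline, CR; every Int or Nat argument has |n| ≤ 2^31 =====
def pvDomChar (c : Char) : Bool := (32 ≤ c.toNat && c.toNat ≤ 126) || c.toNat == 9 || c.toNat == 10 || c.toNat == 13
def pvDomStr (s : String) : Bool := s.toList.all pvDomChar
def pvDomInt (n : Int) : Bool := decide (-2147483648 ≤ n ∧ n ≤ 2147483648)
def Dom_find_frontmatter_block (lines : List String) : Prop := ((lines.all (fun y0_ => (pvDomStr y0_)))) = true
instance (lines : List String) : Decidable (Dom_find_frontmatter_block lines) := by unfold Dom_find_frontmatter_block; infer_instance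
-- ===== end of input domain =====

-- B replaces A's guarded skip-then-scan while-loops by building two index tables
-- (delimiter indices, first non-blank index) and reading the answer off them (objective: alternative).

-- ===== PORT A =====
-- while i < len(lines) and lines[i].strip() == "": i += 1   (returns i and the remaining suffix)
def aSkipBlank : List String → Int → Int × List String
  | [], i => (i, [])
  | l :: ls, i => if PySem.Str.strip l = "" then aSkipBlank ls (i + 1) else (i, l :: ls)

-- while j < len(lines): if lines[j].strip() == "---": return (start, j); j += 1; return (start, -1)
def aFindClose (start : Int) : List String → Int → Int × Int
  | [], _ => (start, -1)
  | l :: ls, j => if PySem.Str.strip l = "---" then (start, j) else aFindClose start ls (j + 1)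

def find_frontmatter_block (lines : List String) : Int × Int :=
  match aSkipBlank lines 0 with
  | (_, []) => (-1, -1)                                   -- i >= len(lines)
  | (i, l :: rest) =>
    if PySem.Str.strip l ≠ "---" then (-1, -1)
    else aFindClose i rest (i + 1)

-- ===== PORT B =====
def find_frontmatter_block_alt (lines : List String) : Int × Int :=
  let delims := (PySem.List.enumerate lines).filterMap
    (fun p => if PySem.Str.strip p.2 = "---" then some p.1 else none)
  let first := (PySem.List.enumerate lines).find? (fun p => !(PySem.Str.strip p.2 == ""))
  match first with
  | none => (-1, -1)
  | some p =>
    if delims.contains p.1 then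
      (p.1, (delims.find? (fun d => decide (p.1 < d))).getD (-1))
    else (-1, -1)

-- ===== PRECONDITION & SPEC =====
def Spec_find_frontmatter_block (lines : List String) (out : Int × Int) : Prop := out = find_frontmatter_block_alt lines
instance (lines : List String) (out : Int × Int) : Decidable (Spec_find_frontmatter_block lines out) := by unfold Spec_find_frontmatter_block; infer_instance

-- ===== CLAIM (what is proved, stated in full; the proofs are below) =====
def Claim_equal_find_frontmatter_block : Prop := ∀ (lines : List String), Dom_find_frontmatter_block lines → Spec_find_frontmatter_block lines (find_frontmatter_block lines)

-- ===== LEMMAS AND PROOFS =====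

-- A's algorithm generalized over the starting index
def Ag (lines : List String) (s : Int) : Int × Int :=
  match aSkipBlank lines s with
  | (_, []) => (-1, -1)
  | (i, l :: rest) =>
    if PySem.Str.strip l ≠ "---" then (-1, -1)
    else aFindClose i rest (i + 1)

-- B's algorithm generalized over the enumerate offset
def delimsOf (lines : List String) (s : Int) : List Int :=
  (PySem.List.enumerate lines s).filterMap
    (fun p => if PySem.Str.strip p.2 = "---" then some p.1 else none)

def Bg (lines : List String) (s : Int) : Int × Int :=
  match (PySem.List.enumerate lines s).find? (fun p => !(PySem.Str.strip p.2 == "")) with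
  | none => (-1, -1)
  | some p =>
    if (delimsOf lines s).contains p.1 then
      (p.1, ((delimsOf lines s).find? (fun d => decide (p.1 < d))).getD (-1))
    else (-1, -1)

theorem mem_delimsOf_ge {lines : List String} {s d : Int}
    (h : d ∈ delimsOf lines s) : s ≤ d := by
  induction lines generalizing s with
  | nil => simp [delimsOf, PySem.List.enumerate_nil] at h
  | cons l ls ih =>
    unfold delimsOf at h
    rw [PySem.List.enumerate_cons, List.filterMap_cons] at h
    by_cases hl : PySem.Str.strip l = "---"
    · simp only [hl, if_pos] at h
      rcases List.mem_cons.mp h with rfl | h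
      · omega
      · have := ih (s := s + 1) (show d ∈ delimsOf ls (s + 1) from h); omega
    · simp only [hl, if_neg, not_false_iff] at h
      have := ih (s := s + 1) (show d ∈ delimsOf ls (s + 1) from h); omega

theorem aFindClose_eq (ls : List String) (start j : Int) (h : start < j) :
    aFindClose start ls j =
      (start, ((delimsOf ls j).find? (fun d => decide (start < d))).getD (-1)) := by
  induction ls generalizing j with
  | nil => simp [aFindClose, delimsOf, PySem.List.enumerate_nil]
  | cons l ls ih =>
    by_cases hl : PySem.Str.strip l = "---"
    · simp [aFindClose, hl, delimsOf, PySem.List.enumerate_cons, h]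
    · simp [aFindClose, hl, delimsOf, PySem.List.enumerate_cons,
        ih (j + 1) (by omega), delimsOf]

theorem Ag_eq_Bg (lines : List String) (s : Int) : Ag lines s = Bg lines s := by
  induction lines generalizing s with
  | nil => simp [Ag, Bg, aSkipBlank, PySem.List.enumerate_nil]
  | cons l ls ih =>
    by_cases hb : PySem.Str.strip l = ""
    · -- blank first line: both sides reduce to the tail at offset s+1
      have hA : Ag (l :: ls) s = Ag ls (s + 1) := by
        simp [Ag, aSkipBlank, hb]
      have hf : (PySem.List.enumerate (l :: ls) s).find? (fun p => !(PySem.Str.strip p.2 == ""))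
          = (PySem.List.enumerate ls (s + 1)).find? (fun p => !(PySem.Str.strip p.2 == "")) := by
        simp [PySem.List.enumerate_cons, hb]
      have hdl : delimsOf (l :: ls) s = delimsOf ls (s + 1) := by
        simp [delimsOf, PySem.List.enumerate_cons, hb]
      rw [hA, ih]
      unfold Bg
      rw [hf, hdl]
    · have hf : (PySem.List.enumerate (l :: ls) s).find? (fun p => !(PySem.Str.strip p.2 == ""))
          = some (s, l) := by
        simp [PySem.List.enumerate_cons, hb]
      by_cases hd : PySem.Str.strip l = "---"
      · have hA : Ag (l :: ls) s = aFindClose s ls (s + 1) := by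
          simp [Ag, aSkipBlank, hd]
        have hdl : delimsOf (l :: ls) s = s :: delimsOf ls (s + 1) := by
          simp [delimsOf, PySem.List.enumerate_cons, hd]
        rw [hA, aFindClose_eq ls s (s + 1) (by omega)]
        unfold Bg
        rw [hf, hdl]
        simp
      · have hA : Ag (l :: ls) s = (-1, -1) := by
          simp [Ag, aSkipBlank, hb, hd]
        have hdl : delimsOf (l :: ls) s = delimsOf ls (s + 1) := by
          simp [delimsOf, PySem.List.enumerate_cons, hd]
        have hnm : s ∉ delimsOf ls (s + 1) := by
          intro hm; have := mem_delimsOf_ge hm; omega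
        rw [hA]
        unfold Bg
        rw [hf, hdl]
        simp [hnm]

-- ===== VERDICT (by name: the statement is the Claim_ definition above) =====
theorem find_frontmatter_block_spec : Claim_equal_find_frontmatter_block := by
  intro lines _
  show find_frontmatter_block lines = find_frontmatter_block_alt lines
  have h0 : find_frontmatter_block lines = Ag lines 0 := rfl
  have h1 : find_frontmatter_block_alt lines = Bg lines 0 := rfl
  rw [h0, h1, Ag_eq_Bg]
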